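-- pv_equiv track=rewrite | github.com/MrBrantCode/unitest_baseline | mut_generate/mist_train_cf/cf_29462/solution.py | organize_dependencies
-- ===== SOURCE A (Python) =====
-- def organize_dependencies(dependencies):
--     dependency_versions = {}
--     for dependency in dependencies:
--         name, version = dependency.split(" => ")
--         name = name.strip()
--         version = version.strip()
--         if name in dependency_versions:
--             dependency_versions[name].append(version)
--         else:
--             dependency_versions[name] = [version]
--     return dependency_versions
-- ===== SOURCE B (Python) =====
-- def organize_dependencies(dependencies):
--     pairs = []
--     for dependency in dependencies:
--         name, version = dependency.split(" => ")
--         pairs.append((name.strip(), version.strip()))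
--     names = list(dict.fromkeys(name for name, _ in pairs))
--     return {name: [v for n, v in pairs if n == name] for name in names}
-- ===== Notes on version B (the rewrite author's own statement) =====
-- stated objective: alternative
-- what changed: Replaces the incremental dict accumulation (membership test + append/insert per element) with a three-stage pipeline: parse all entries into (name, version) pairs, dedup the names in first-occurrence order, then build the dict by filtering the pair list per distinct name.
import Mathlib
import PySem

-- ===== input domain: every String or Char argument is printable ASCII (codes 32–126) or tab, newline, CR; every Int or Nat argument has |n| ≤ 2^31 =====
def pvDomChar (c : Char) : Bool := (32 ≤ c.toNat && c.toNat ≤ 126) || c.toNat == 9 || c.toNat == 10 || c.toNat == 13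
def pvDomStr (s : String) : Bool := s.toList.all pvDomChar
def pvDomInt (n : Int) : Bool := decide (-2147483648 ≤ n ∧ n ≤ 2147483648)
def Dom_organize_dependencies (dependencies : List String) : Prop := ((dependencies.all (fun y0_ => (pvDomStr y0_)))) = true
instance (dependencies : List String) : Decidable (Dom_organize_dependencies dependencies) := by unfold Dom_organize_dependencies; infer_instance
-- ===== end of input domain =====

-- B replaces A's incremental dict accumulation with a parse → dedup-names → per-name filter pipeline (alternative decomposition, not faster).


-- ===== PORT A =====
def organize_dependencies (dependencies : List String) : List (String × List String) :=
  (dependencies.foldl (fun d dependency =>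
      match PySem.Str.split? dependency " => " with
      | some [name0, version0] =>
          let name := PySem.Str.strip name0
          let version := PySem.Str.strip version0
          if d.contains name then d.modify name [] (fun vs => vs ++ [version])
          else d.insert name [version]
      | _ => d)  -- unreachable under Pre_ (Python raises ValueError on unpacking)
    PySem.Dict.empty).items

-- ===== PORT B =====
-- name, version = dependency.split(" => "); (name.strip(), version.strip())
def pvParsePair (dependency : String) : String × String :=
  let parts := (PySem.Str.split? dependency " => ").getD []
  -- under Pre_, parts = [name0, version0]; outside Pre_ Python B raises at the unpacking
  (PySem.Str.strip (parts.getD 0 ""), PySem.Str.strip (parts.getD 1 ""))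

def organize_dependencies_alt (dependencies : List String) : List (String × List String) :=
  let pairs := dependencies.map pvParsePair
  let names := PySem.List.dedup (pairs.map (fun p => p.1))
  names.map (fun name => (name, (pairs.filter (fun p => p.1 == name)).map (fun p => p.2)))

-- ===== PRECONDITION & SPEC =====
-- Pre_ excludes exactly the inputs where some entry does not split into two parts on " => ",
-- on which Python A raises ValueError at the tuple unpacking.
def Pre_organize_dependencies (dependencies : List String) : Prop :=
  ∀ dep ∈ dependencies, ((PySem.Str.split? dep " => ").getD []).length = 2
instance (dependencies : List String) : Decidable (Pre_organize_dependencies dependencies) := by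
  unfold Pre_organize_dependencies; infer_instance
def pvWitness_organize_dependencies : List String :=
  ["numpy => 1.2", " numpy =>  2.0 ", "flask => 0.1"]

def Spec_organize_dependencies (dependencies : List String) (out : List (String × List String)) : Prop := out = organize_dependencies_alt dependencies
instance (dependencies : List String) (out : List (String × List String)) : Decidable (Spec_organize_dependencies dependencies out) := by unfold Spec_organize_dependencies; infer_instance

-- ===== CLAIM (what is proved, stated in full; the proofs are below) =====
def Claim_equal_organize_dependencies : Prop := ∀ (dependencies : List String), Dom_organize_dependencies dependencies → Pre_organize_dependencies dependencies → Spec_organize_dependencies dependencies (organize_dependencies dependencies)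

-- ===== LEMMAS AND PROOFS =====

-- A's two branches are both 'd[name] = d.get(name, []) + [version]'.
lemma pvStep_eq_modify (d : PySem.Dict String (List String)) (n v : String) :
    (if d.contains n then d.modify n [] (fun vs => vs ++ [v]) else d.insert n [v])
      = d.modify n [] (fun vs => vs ++ [v]) := by
  by_cases h : d.contains n = true
  · simp [h]
  · have h' : d.contains n = false := by simpa using h
    simp [h', PySem.Dict.modify, PySem.Dict.getD_of_not_contains d ([] : List String) h']

-- Under Pre_, A's loop body is the modify-by-parsed-pair loop.
lemma pvStep_eq_of_pre (d : PySem.Dict String (List String)) (dep : String)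
    (h : ((PySem.Str.split? dep " => ").getD []).length = 2) :
    (match PySem.Str.split? dep " => " with
      | some [name0, version0] =>
          let name := PySem.Str.strip name0
          let version := PySem.Str.strip version0
          if d.contains name then d.modify name [] (fun vs => vs ++ [version])
          else d.insert name [version]
      | _ => d)
      = d.modify (pvParsePair dep).1 [] (fun vs => vs ++ [(pvParsePair dep).2]) := by
  cases hs : PySem.Str.split? dep " => " with
  | none => simp [hs] at h
  | some l =>
    match l with
    | [] => simp [hs] at h
    | [a] => simp [hs] at h
    | [a, b] =>
      simpa [pvParsePair, hs] using pvStep_eq_modify d (PySem.Str.strip a) (PySem.Str.strip b)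
    | a :: b :: c :: t => simp [hs] at h

-- ===== VERDICT (by name: the statement is the Claim_ definition above) =====
theorem organize_dependencies_spec : Claim_equal_organize_dependencies := by
  intro deps _ hpre
  unfold Spec_organize_dependencies organize_dependencies organize_dependencies_alt
  have hfold :
      deps.foldl (fun d dependency =>
        match PySem.Str.split? dependency " => " with
        | some [name0, version0] =>
            let name := PySem.Str.strip name0
            let version := PySem.Str.strip version0
            if d.contains name then d.modify name [] (fun vs => vs ++ [version])
            else d.insert name [version]
        | _ => d) PySem.Dict.empty
      = (deps.map pvParsePair).foldl
          (fun d p => d.modify p.1 [] (fun vs => vs ++ [p.2])) PySem.Dict.empty := by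
    rw [List.foldl_map]
    exact PySem.List.foldl_congr_mem _ _ _ _ (fun d dep hmem => pvStep_eq_of_pre d dep (hpre dep hmem))
  rw [hfold]
  set pairs := deps.map pvParsePair with hpairs
  have hnd : ((pairs.foldl (fun d p => d.modify p.1 [] (fun vs => vs ++ [p.2]))
      PySem.Dict.empty)).keys.Nodup := by
    exact PySem.Dict.nodup_keys_foldl_modify_key pairs (fun p => p.1) []
      (fun d p vs => vs ++ [p.2]) PySem.Dict.empty PySem.Dict.nodup_keys_empty
  rw [PySem.Dict.items_eq_map_keys _ hnd []]
  have hkeys : ((pairs.foldl (fun d p => d.modify p.1 [] (fun vs => vs ++ [p.2]))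
      PySem.Dict.empty)).keys = PySem.List.dedup (pairs.map (fun p => p.1)) := by
    rw [PySem.Dict.keys_foldl_modify_key pairs (fun p => p.1) [] (fun d p vs => vs ++ [p.2])]
    rfl
  rw [hkeys]
  apply List.map_congr_left
  intro k _
  rw [PySem.Dict.getD_foldl_modify_append pairs PySem.Dict.empty k]
  simp [PySem.Dict.getD_empty]
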